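-- pv_equiv track=rewrite | github.com/OpportunV/adventofcode | 2018/day2.py | part_one
-- ===== SOURCE A (Python) =====
-- from collections import Counter
--
-- def part_one(inp):
--     double = triple = 0
--     for line in inp:
--         counter = Counter(line)
--         if 2 in counter.values():
--             double += 1
--         if 3 in counter.values():
--             triple += 1
--
--     return double * triple
-- ===== SOURCE B (Python) =====
-- def run_lengths(s):
--     # run-length encoding of an already-sorted list (groupby-style scan)
--     if not s:
--         return []
--     c = s[0]
--     i = 1
--     while i < len(s) and s[i] == c:
--         i += 1
--     return [i] + run_lengths(s[i:])
--
--
-- def part_one(inp):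
--     double = triple = 0
--     for line in inp:
--         lengths = run_lengths(sorted(line))
--         if 2 in lengths:
--             double += 1
--         if 3 in lengths:
--             triple += 1
--     return double * triple
-- ===== Notes on version B (the rewrite author's own statement) =====
-- stated objective: alternative
-- what changed: Per-line character frequencies are obtained by sorting the line and run-length-encoding the sorted result (a groupby-style scan) instead of building a Counter hash map; doubles/triples are detected as run lengths 2 and 3.
import Mathlib
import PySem

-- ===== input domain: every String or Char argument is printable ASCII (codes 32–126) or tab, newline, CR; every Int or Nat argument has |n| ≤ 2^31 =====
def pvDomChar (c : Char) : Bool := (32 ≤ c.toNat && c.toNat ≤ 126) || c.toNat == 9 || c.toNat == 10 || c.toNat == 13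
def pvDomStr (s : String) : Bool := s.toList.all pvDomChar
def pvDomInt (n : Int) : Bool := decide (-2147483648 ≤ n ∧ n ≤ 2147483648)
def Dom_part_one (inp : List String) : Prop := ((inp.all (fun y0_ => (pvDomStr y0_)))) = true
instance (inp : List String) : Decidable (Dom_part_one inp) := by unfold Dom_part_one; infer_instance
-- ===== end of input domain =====

-- B replaces the per-line Counter hash map by sort + run-length scan (groupby-style); alternative decomposition, same result.

-- ===== PORT A =====
def part_one (inp : List String) : Int :=
  let st := inp.foldl (fun (st : Int × Int) line =>
    let counter := PySem.Dict.counter line.toList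
    let d := if (2 : Int) ∈ counter.values then st.1 + 1 else st.1
    let t := if (3 : Int) ∈ counter.values then st.2 + 1 else st.2
    (d, t)) (0, 0)
  st.1 * st.2

-- ===== PORT B =====
-- run-length encoding of an already-sorted list: the inner while loop of Source B's
-- run_lengths counts the prefix of elements equal to the head (= 1 + takeWhile length),
-- then recurses on the rest of the list (= dropWhile).
def runLengths : List Char → List Int
  | [] => []
  | c :: rest =>
    ((1 + (rest.takeWhile (· == c)).length : Int)) :: runLengths (rest.dropWhile (· == c))
termination_by l => l.length
decreasing_by
  exact Nat.lt_succ_of_le (List.length_dropWhile_le _ _)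

def part_one_alt (inp : List String) : Int :=
  let st := inp.foldl (fun (st : Int × Int) line =>
    let lengths := runLengths (PySem.List.sorted line.toList (fun c => c) false)
    let d := if (2 : Int) ∈ lengths then st.1 + 1 else st.1
    let t := if (3 : Int) ∈ lengths then st.2 + 1 else st.2
    (d, t)) (0, 0)
  st.1 * st.2

-- ===== PRECONDITION & SPEC =====
def Spec_part_one (inp : List String) (out : Int) : Prop := out = part_one_alt inp
instance (inp : List String) (out : Int) : Decidable (Spec_part_one inp out) := by unfold Spec_part_one; infer_instance

-- ===== CLAIM (what is proved, stated in full; the proofs are below) =====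
def Claim_equal_part_one : Prop := ∀ (inp : List String), Dom_part_one inp → Spec_part_one inp (part_one inp)

-- ===== LEMMAS AND PROOFS =====

-- A side: k is among the Counter's values iff some character of the line has count k.
theorem mem_values_counter (xs : List Char) (k : Int) :
    k ∈ (PySem.Dict.counter xs).values ↔ ∃ c ∈ xs, (xs.count c : Int) = k := by
  simp [PySem.Dict.values, PySem.Dict.items_counter, List.mem_map, PySem.Set.mem_ofList]

-- In a sorted list all of whose elements are ≥ c, dropping the leading run of c's removes every c.
theorem not_mem_dropWhile_sorted (c : Char) (l : List Char)
    (hp : l.Pairwise (· ≤ ·)) (hall : ∀ x ∈ l, c ≤ x) :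
    c ∉ l.dropWhile (· == c) := by
  induction l with
  | nil => simp
  | cons d rs ih =>
    rw [List.pairwise_cons] at hp
    by_cases hdc : d = c
    · subst hdc
      simpa using ih hp.2 (fun x hx => hp.1 x hx)
    · have hcd : c < d := lt_of_le_of_ne (hall d (by simp)) (fun h => hdc h.symm)
      rw [List.dropWhile_cons_of_neg (by simpa using hdc)]
      intro hc
      rcases List.mem_cons.mp hc with h | h
      · exact hdc h.symm
      · exact absurd (hp.1 c h) (not_le.mpr hcd)

-- B side: on a sorted list, the run lengths are exactly the character counts.
theorem mem_runLengths_sorted (l : List Char) (hp : l.Pairwise (· ≤ ·)) (k : Int) :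
    k ∈ runLengths l ↔ ∃ c ∈ l, (l.count c : Int) = k := by
  induction hn : l.length using Nat.strong_induction_on generalizing l with
  | _ n ihn =>
  match l, hp with
  | [], _ => simp [runLengths]
  | c :: rest, hp =>
    have ih : ∀ (hr : (rest.dropWhile (· == c)).Pairwise (· ≤ ·)),
        k ∈ runLengths (rest.dropWhile (· == c)) ↔
          ∃ c' ∈ rest.dropWhile (· == c), ((rest.dropWhile (· == c)).count c' : Int) = k := by
      intro hr
      exact ihn _ (by subst hn; exact Nat.lt_succ_of_le (List.length_dropWhile_le _ _)) _ hr rfl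
    rw [List.pairwise_cons] at hp
    have hall : ∀ x ∈ rest, c ≤ x := hp.1
    have hrp : rest.Pairwise (· ≤ ·) := hp.2
    set t := rest.takeWhile (· == c) with ht
    set r := rest.dropWhile (· == c) with hr
    have hsplit : t ++ r = rest := List.takeWhile_append_dropWhile
    have htall : ∀ x ∈ t, x = c := by
      intro x hx
      have := List.mem_takeWhile_imp hx
      simpa using this
    have hcr : c ∉ r := not_mem_dropWhile_sorted c rest hrp hall
    have hrperm : r.Pairwise (· ≤ ·) := hrp.sublist (List.dropWhile_sublist _)
    have hcount_c : (c :: rest).count c = 1 + t.length := by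
      rw [List.count_cons_self, ← hsplit, List.count_append]
      have h1 : t.count c = t.length := List.count_eq_length.mpr (fun b hb => ((htall b hb).symm ▸ rfl))
      have h2 : r.count c = 0 := List.count_eq_zero.mpr hcr
      omega
    have hcount_r : ∀ c' ∈ r, (c :: rest).count c' = r.count c' := by
      intro c' hc'
      have hne : c' ≠ c := fun h => hcr (h ▸ hc')
      have hnt : c' ∉ t := fun h => hne (htall c' h)
      have h0 : t.count c' = 0 := List.count_eq_zero.mpr hnt
      rw [← hsplit]
      simp [List.count_cons, List.count_append, h0]
      exact fun h => hne h.symm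
    rw [runLengths]
    constructor
    · intro hk
      rcases List.mem_cons.mp hk with h | h
      · exact ⟨c, by simp, by rw [hcount_c, ht]; push_cast; omega⟩
      · rcases (ih hrperm).mp h with ⟨c', hc'r, hcnt⟩
        refine ⟨c', ?_, ?_⟩
        · exact List.mem_cons_of_mem _ (hsplit ▸ List.mem_append_right t hc'r)
        · rw [hcount_r c' hc'r]; exact hcnt
    · rintro ⟨c', hc'l, hcnt⟩
      by_cases hcc : c' = c
      · subst hcc
        rw [hcount_c, ht] at hcnt
        apply List.mem_cons.mpr
        left
        push_cast at hcnt ⊢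
        omega
      · have hc'rest : c' ∈ rest := by
          rcases List.mem_cons.mp hc'l with h | h
          · exact absurd h hcc
          · exact h
        have hc'r : c' ∈ r := by
          rcases List.mem_append.mp (hsplit ▸ hc'rest) with h | h
          · exact absurd (htall c' h) hcc
          · exact h
        right
        exact (ih hrperm).mpr ⟨c', hc'r, by rw [← hcount_r c' hc'r]; exact hcnt⟩

-- Per line: the two membership tests agree.
theorem cond_eq (s : List Char) (k : Int) :
    (k ∈ (PySem.Dict.counter s).values) =
      (k ∈ runLengths (PySem.List.sorted s (fun c => c) false)) := by
  apply propext
  rw [mem_values_counter,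
    mem_runLengths_sorted _ (PySem.List.sorted_pairwise s (fun c => c))]
  have hperm : (PySem.List.sorted s (fun c => c) false).Perm s := PySem.List.sorted_perm s _ _
  constructor
  · rintro ⟨c, hc, hcnt⟩
    exact ⟨c, (PySem.List.mem_sorted _ _ _ _).mpr hc, by rw [hperm.count_eq]; exact hcnt⟩
  · rintro ⟨c, hc, hcnt⟩
    exact ⟨c, (PySem.List.mem_sorted _ _ _ _).mp hc, by rw [← hperm.count_eq]; exact hcnt⟩

-- ===== VERDICT (by name: the statement is the Claim_ definition above) =====
theorem part_one_spec : Claim_equal_part_one := by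
  intro inp _
  unfold Spec_part_one part_one part_one_alt
  simp only [cond_eq]
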